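-- pv_equiv track=rewrite | github.com/EvanSurtel/Webscraping | webcrawler3.py | function
-- ===== SOURCE A (Python) =====
-- data = []
--
-- def function(s):
--     max = 0
--     max_i = 0
--     max_j = 0
--     i = 0
--     while (i < len(s) - 1):
--         c = 0
--         a = 0
--         while a < i:
--             if (s[a] == '1'):
--                 c += 1
--             a += 1
--         j = i+1
--         while (j < len(s)):
--             value = c
--             m = i
--             while m <= j:
--                 if (s[m] == '0'):
--                     value += 1
--                 m += 1
--             n = j+1
--             while n < len(s):
--                 if s[n] == '1':
--                     value += 1
--                 n += 1
--
--             data.append([i, j, value])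
--             if value > max:
--                 max = value
--                 max_i = i
--                 max_j = j
--
--             j += 1
--
--         i += 1
--
--     return max, max_i, max_j
-- ===== SOURCE B (Python) =====
-- def function(s):
--     # O(n^2) via prefix counts of '1'/'0' instead of A's O(n^3)/O(n^4) rescans.
--     # (A also appends to the module-global `data`; equivalence is about the return value.)
--     n = len(s)
--     ones = [0]
--     zeros = [0]
--     co = 0
--     cz = 0
--     for ch in s:
--         co += 1 if ch == '1' else 0
--         cz += 1 if ch == '0' else 0
--         ones.append(co)
--         zeros.append(cz)
--     best = 0
--     bi = 0
--     bj = 0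
--     total = ones[n]
--     for i in range(n - 1):
--         base = ones[i] - zeros[i]
--         for j in range(i + 1, n):
--             v = base + zeros[j + 1] + total - ones[j + 1]
--             if v > best:
--                 best, bi, bj = v, i, j
--     return best, bi, bj
-- ===== Notes on version B (the rewrite author's own statement) =====
-- stated objective: faster
-- what changed: Replaced A's per-pair rescans of the string (three inner counting loops per (i,j)) by prefix counts of the one/zero characters built once, so each pair's value is O(1); A's append to the module-global data list is a side effect not reproduced, the equivalence is about the return value.
import Mathlib
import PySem

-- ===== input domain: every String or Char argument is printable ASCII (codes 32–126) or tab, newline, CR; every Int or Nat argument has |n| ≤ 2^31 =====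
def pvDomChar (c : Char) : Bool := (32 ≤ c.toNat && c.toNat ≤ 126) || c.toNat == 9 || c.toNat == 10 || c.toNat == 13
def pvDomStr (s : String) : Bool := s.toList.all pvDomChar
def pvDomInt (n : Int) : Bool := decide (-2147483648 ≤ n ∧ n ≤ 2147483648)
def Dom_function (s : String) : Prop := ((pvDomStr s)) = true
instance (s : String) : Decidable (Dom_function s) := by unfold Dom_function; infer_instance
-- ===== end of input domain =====

-- B replaces A's per-pair counting loops by prefix counts of '1'/'0' built once (O(n^2) vs O(n^3));
-- A also appends to the module-global `data` list, a side effect not reproduced: the claim is about the return value.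


-- ===== PORT A =====
-- literal transliteration of A: the outer while loops become folds over the same index
-- ranges; s[k] (always in range at its use sites) is PySem.List.pyGetD; the global
-- `data.append` is a side effect, dropped. Returns (max, max_i, max_j) as a 3-list.
def function (s : String) : List Int :=
  let cs := s.toList
  let len : Int := (cs.length : Int)
  let st :=
    (PySem.List.pyRange 0 (len - 1) 1).foldl (fun (st : Int × Int × Int) i =>
      -- while a < i: count '1's in s[0:i]
      let c : Int := (PySem.List.pyRange 0 i 1).foldl
        (fun c a => if PySem.List.pyGetD cs a ' ' = '1' then c + 1 else c) 0
      -- while j < len(s)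
      (PySem.List.pyRange (i + 1) len 1).foldl (fun (st : Int × Int × Int) j =>
        let value := c
        -- while m <= j: count '0's in s[i:j+1]
        let value := (PySem.List.pyRange i (j + 1) 1).foldl
          (fun v m => if PySem.List.pyGetD cs m ' ' = '0' then v + 1 else v) value
        -- while n < len(s): count '1's in s[j+1:]
        let value := (PySem.List.pyRange (j + 1) len 1).foldl
          (fun v n => if PySem.List.pyGetD cs n ' ' = '1' then v + 1 else v) value
        if value > st.1 then (value, i, j) else st) st)
      ((0 : Int), (0 : Int), (0 : Int))
  [st.1, st.2.1, st.2.2]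

-- ===== PORT B =====
-- literal transliteration of Source B: one pass builds the prefix-count lists `ones`/`zeros`
-- (state ((ones, zeros), co, cz)), then the double loop reads each pair's value in O(1).
def function_alt (s : String) : List Int :=
  let cs := s.toList
  let n : Int := (cs.length : Int)
  let built := cs.foldl
    (fun (st : (List Int × List Int) × Int × Int) ch =>
      let co := st.2.1 + (if ch = '1' then (1 : Int) else 0)
      let cz := st.2.2 + (if ch = '0' then (1 : Int) else 0)
      ((st.1.1 ++ [co], st.1.2 ++ [cz]), co, cz))
    ((([0], [0]) : List Int × List Int), (0 : Int), (0 : Int))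
  let ones := built.1.1
  let zeros := built.1.2
  let total := ones.getD n.toNat 0   -- ones[n]; index n is in range
  let st :=
    (PySem.List.pyRange 0 (n - 1) 1).foldl (fun (st : Int × Int × Int) i =>
      let base := ones.getD i.toNat 0 - zeros.getD i.toNat 0
      (PySem.List.pyRange (i + 1) n 1).foldl (fun (st : Int × Int × Int) j =>
        let v := base + zeros.getD (j + 1).toNat 0 + total - ones.getD (j + 1).toNat 0
        if v > st.1 then (v, i, j) else st) st)
      ((0 : Int), (0 : Int), (0 : Int))
  [st.1, st.2.1, st.2.2]

-- ===== PRECONDITION & SPEC =====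
def Spec_function (s : String) (out : List Int) : Prop := out = function_alt s
instance (s : String) (out : List Int) : Decidable (Spec_function s out) := by unfold Spec_function; infer_instance

-- ===== CLAIM (what is proved, stated in full; the proofs are below) =====
def Claim_equal_function : Prop := ∀ (s : String), Dom_function s → Spec_function s (function s)

-- ===== LEMMAS AND PROOFS =====

-- count of ch among the first k characters, as an Int
def cntTake (cs : List Char) (ch : Char) (k : Nat) : Int := ((cs.take k).count ch : Int)

theorem cntTake_zero (cs : List Char) (ch : Char) : cntTake cs ch 0 = 0 := by
  simp [cntTake]

theorem cntTake_succ (cs : List Char) (ch d : Char) (k : Nat) (hk : k < cs.length) :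
    cntTake cs ch (k + 1) =
      cntTake cs ch k + (if PySem.List.pyGetD cs (k : Int) d = ch then 1 else 0) := by
  have hget : PySem.List.pyGetD cs (k : Int) d = cs[k] := by
    rw [PySem.List.pyGetD_eq_getElem cs d (by exact_mod_cast Nat.zero_le k)
      (by exact_mod_cast hk)]
    simp
  rw [hget]
  simp only [cntTake, List.take_add_one, List.count_append, getElem?_pos cs k hk]
  by_cases h : cs[k] = ch <;> simp [h, List.count_nil]

-- A's counting loops: fold over pyRange lo hi counting characters equal to ch
theorem foldl_count_range (cs : List Char) (ch d : Char) :
    ∀ (k : Nat) (lo hi : Int) (v0 : Int), 0 ≤ lo → lo ≤ hi → hi ≤ (cs.length : Int) →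
      (hi - lo).toNat = k →
      (PySem.List.pyRange lo hi 1).foldl
          (fun v m => if PySem.List.pyGetD cs m d = ch then v + 1 else v) v0
        = v0 + cntTake cs ch hi.toNat - cntTake cs ch lo.toNat := by
  intro k
  induction k with
  | zero =>
    intro lo hi v0 h0 hle hhi hk
    have : hi = lo := by omega
    subst this
    rw [PySem.List.pyRange_one_eq_nil le_rfl]
    simp
  | succ k ih =>
    intro lo hi v0 h0 hle hhi hk
    have hlt : lo < hi := by omega
    rw [PySem.List.pyRange_one_cons hlt]
    simp only [List.foldl_cons]
    rw [ih (lo + 1) hi _ (by omega) (by omega) hhi (by omega)]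
    have hlo : lo = ((lo.toNat : Nat) : Int) := by omega
    have hsucc := cntTake_succ cs ch d lo.toNat (by omega)
    have h1 : (lo + 1).toNat = lo.toNat + 1 := by omega
    rw [h1, hsucc, ← hlo]
    split <;> omega

-- characterization of B's prefix-building fold
def prefList (ch : Char) : List Char → Int → List Int
  | [], _ => []
  | c :: t, x =>
      let x' := x + (if c = ch then (1 : Int) else 0)
      x' :: prefList ch t x'

theorem build_fold_eq (cs : List Char) :
    ∀ (os zs : List Int) (co cz : Int),
      cs.foldl
        (fun (st : (List Int × List Int) × Int × Int) ch =>
          let co := st.2.1 + (if ch = '1' then (1 : Int) else 0)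
          let cz := st.2.2 + (if ch = '0' then (1 : Int) else 0)
          ((st.1.1 ++ [co], st.1.2 ++ [cz]), co, cz)) ((os, zs), co, cz)
      = ((os ++ prefList '1' cs co, zs ++ prefList '0' cs cz),
          co + (cs.count '1' : Int), cz + (cs.count '0' : Int)) := by
  induction cs with
  | nil => intro os zs co cz; simp [prefList]
  | cons c t ih =>
    intro os zs co cz
    simp only [List.foldl_cons, ih, prefList, List.append_assoc, List.singleton_append,
      List.count_cons, Prod.mk.injEq]
    by_cases h1 : c = '1' <;> by_cases h0 : c = '0' <;> simp_all <;> ring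

theorem prefList_getD (ch : Char) :
    ∀ (cs : List Char) (x : Int) (k : Nat), k ≤ cs.length →
      (x :: prefList ch cs x).getD k 0 = x + cntTake cs ch k := by
  intro cs
  induction cs with
  | nil =>
    intro x k hk
    have : k = 0 := by simpa using hk
    subst this
    simp [cntTake]
  | cons c t ih =>
    intro x k hk
    cases k with
    | zero => simp [cntTake]
    | succ k =>
      simp only [prefList, List.getD_cons_succ]
      rw [ih _ k (by simpa using hk)]
      simp only [cntTake, List.take_succ_cons, List.count_cons]
      by_cases h : c = ch <;> simp [h] <;> ring

theorem ones_getD (cs : List Char) (k : Nat) (hk : k ≤ cs.length) :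
    ((0 : Int) :: prefList '1' cs 0).getD k 0 = cntTake cs '1' k := by
  rw [prefList_getD '1' cs 0 k hk]; ring

theorem zeros_getD (cs : List Char) (k : Nat) (hk : k ≤ cs.length) :
    ((0 : Int) :: prefList '0' cs 0).getD k 0 = cntTake cs '0' k := by
  rw [prefList_getD '0' cs 0 k hk]; ring

theorem cntTake_len (cs : List Char) (ch : Char) :
    cntTake cs ch cs.length = (cs.count ch : Int) := by
  simp [cntTake]

-- the two double folds (A's with rescans, B's with prefix lists) coincide
theorem fold_eq (cs : List Char) :
    (PySem.List.pyRange 0 ((cs.length : Int) - 1) 1).foldl (fun (st : Int × Int × Int) i =>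
      (PySem.List.pyRange (i + 1) (cs.length : Int) 1).foldl (fun (st : Int × Int × Int) j =>
        if (PySem.List.pyRange (j + 1) (cs.length : Int) 1).foldl
            (fun v n => if PySem.List.pyGetD cs n ' ' = '1' then v + 1 else v)
            ((PySem.List.pyRange i (j + 1) 1).foldl
              (fun v m => if PySem.List.pyGetD cs m ' ' = '0' then v + 1 else v)
              ((PySem.List.pyRange 0 i 1).foldl
                (fun c a => if PySem.List.pyGetD cs a ' ' = '1' then c + 1 else c) 0))
            > st.1 then
          ((PySem.List.pyRange (j + 1) (cs.length : Int) 1).foldl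
            (fun v n => if PySem.List.pyGetD cs n ' ' = '1' then v + 1 else v)
            ((PySem.List.pyRange i (j + 1) 1).foldl
              (fun v m => if PySem.List.pyGetD cs m ' ' = '0' then v + 1 else v)
              ((PySem.List.pyRange 0 i 1).foldl
                (fun c a => if PySem.List.pyGetD cs a ' ' = '1' then c + 1 else c) 0)),
            i, j)
        else st) st)
      ((0 : Int), (0 : Int), (0 : Int))
    =
    (PySem.List.pyRange 0 ((cs.length : Int) - 1) 1).foldl (fun (st : Int × Int × Int) i =>
      (PySem.List.pyRange (i + 1) (cs.length : Int) 1).foldl (fun (st : Int × Int × Int) j =>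
        if ((0 : Int) :: prefList '1' cs 0).getD i.toNat 0
            - ((0 : Int) :: prefList '0' cs 0).getD i.toNat 0
            + ((0 : Int) :: prefList '0' cs 0).getD (j + 1).toNat 0
            + ((0 : Int) :: prefList '1' cs 0).getD ((cs.length : Int)).toNat 0
            - ((0 : Int) :: prefList '1' cs 0).getD (j + 1).toNat 0 > st.1 then
          (((0 : Int) :: prefList '1' cs 0).getD i.toNat 0
            - ((0 : Int) :: prefList '0' cs 0).getD i.toNat 0
            + ((0 : Int) :: prefList '0' cs 0).getD (j + 1).toNat 0
            + ((0 : Int) :: prefList '1' cs 0).getD ((cs.length : Int)).toNat 0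
            - ((0 : Int) :: prefList '1' cs 0).getD (j + 1).toNat 0,
            i, j)
        else st) st)
      ((0 : Int), (0 : Int), (0 : Int)) := by
  apply PySem.List.foldl_congr_mem
  intro st i hi
  rw [PySem.List.mem_pyRange_one] at hi
  apply PySem.List.foldl_congr_mem
  intro st2 j hj
  rw [PySem.List.mem_pyRange_one] at hj
  rw [foldl_count_range cs '1' ' ' (i - 0).toNat 0 i 0 le_rfl hi.1 (by omega) rfl,
    foldl_count_range cs '0' ' ' (j + 1 - i).toNat i (j + 1) _ (by omega) (by omega)
      (by omega) rfl,
    foldl_count_range cs '1' ' ' ((cs.length : Int) - (j + 1)).toNat (j + 1)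
      (cs.length : Int) _ (by omega) (by omega) le_rfl rfl]
  rw [ones_getD cs i.toNat (by omega), zeros_getD cs i.toNat (by omega),
    ones_getD cs (j + 1).toNat (by omega), zeros_getD cs (j + 1).toNat (by omega),
    ones_getD cs ((cs.length : Int)).toNat (by omega)]
  have hlen : ((cs.length : Int)).toNat = cs.length := by omega
  rw [hlen, cntTake_len]
  simp only [Int.toNat_zero, cntTake_zero]
  have hval : (0 : Int) + cntTake cs '1' i.toNat - 0 +
        cntTake cs '0' (j + 1).toNat - cntTake cs '0' i.toNat +
        ((cs.count '1' : Int)) - cntTake cs '1' (j + 1).toNat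
      = cntTake cs '1' i.toNat - cntTake cs '0' i.toNat +
        cntTake cs '0' (j + 1).toNat + (cs.count '1' : Int) -
        cntTake cs '1' (j + 1).toNat := by ring
  rw [hval]

-- ===== VERDICT (by name: the statement is the Claim_ definition above) =====
theorem function_spec : Claim_equal_function := by
  intro s _
  unfold Spec_function function function_alt
  simp only []
  rw [build_fold_eq s.toList [0] [0] 0 0]
  simp only [List.singleton_append]
  rw [fold_eq s.toList]
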